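-- pv_equiv track=rewrite | github.com/pratyushlabss/TruthLens-AI | backend/services/query_expander.py | _extract_main_entity
-- ===== SOURCE A (Python) =====
-- def _extract_main_entity(claim: str) -> str:
--     """Extract primary entity (name, topic) from claim."""
--     # Capital letters usually indicate proper nouns
--     words = claim.split()
--
--     for word in words:
--         if word[0].isupper() and len(word) > 2:
--             return word
--
--     # Otherwise, first meaningful noun
--     stop_words = {'is', 'are', 'was', 'were', 'a', 'an', 'the', 'and', 'or', 'but', 'in', 'on', 'at', 'to', 'for', 'of', 'that', 'this', 'which'}
--
--     for word in words:
--         if word.lower() not in stop_words: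
--             return word
--
--     return claim[:20]  # Fallback
-- ===== SOURCE B (Python) =====
-- def _extract_main_entity(claim: str) -> str:
--     """Extract primary entity (name, topic) from claim."""
--     stop_words = {'is', 'are', 'was', 'were', 'a', 'an', 'the', 'and', 'or', 'but', 'in', 'on', 'at', 'to', 'for', 'of', 'that', 'this', 'which'}
--     candidate = None
--     # single pass: a capitalized word (>2 chars) wins immediately; otherwise
--     # remember the first non-stopword as the fallback
--     for word in claim.split():
--         if word[0].isupper() and len(word) > 2:
--             return word
--         if candidate is None and word.lower() not in stop_words:
--             candidate = word
--     return candidate if candidate is not None else claim[:20]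
-- ===== Notes on version B (the rewrite author's own statement) =====
-- stated objective: simpler
-- what changed: Replaces A's two separate scans over the word list with a single fused pass that returns a capitalized word immediately and records the first non-stopword as a fallback candidate.
import Mathlib
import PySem

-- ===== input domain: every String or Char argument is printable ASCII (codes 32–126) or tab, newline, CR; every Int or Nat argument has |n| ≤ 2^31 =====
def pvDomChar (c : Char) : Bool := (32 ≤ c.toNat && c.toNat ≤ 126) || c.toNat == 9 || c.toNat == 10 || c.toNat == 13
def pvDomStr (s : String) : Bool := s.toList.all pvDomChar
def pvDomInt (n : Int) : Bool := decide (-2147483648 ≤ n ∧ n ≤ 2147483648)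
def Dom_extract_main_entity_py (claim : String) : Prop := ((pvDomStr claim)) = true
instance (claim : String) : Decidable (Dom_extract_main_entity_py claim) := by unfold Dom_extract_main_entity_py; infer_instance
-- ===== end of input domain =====

-- B fuses A's two scans over the words into one pass (capitalized word returns
-- immediately, first non-stopword is recorded as fallback); same return value, simpler shape.

-- ===== PORT A =====
-- the stop-word set (shared text of both Pythons)
def pvStops : List String :=
  ["is", "are", "was", "were", "a", "an", "the", "and", "or", "but", "in", "on",
   "at", "to", "for", "of", "that", "this", "which"]

-- word[0].isupper() and len(word) > 2  (pyGet? none = IndexError; split₀ never yields "", the branch is then False and the loop continues)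
def pvIsCap (w : String) : Bool :=
  (match PySem.Str.pyGet? w 0 with
   | some c => PySem.Chars.isupper c
   | none => false) && decide (2 < PySem.Str.len w)

-- first loop of A: return the first capitalized word
def pvLoopCap : List String → Option String
  | [] => none
  | w :: ws => if pvIsCap w then some w else pvLoopCap ws

-- second loop of A: return the first word whose lowercase is not a stop word
def pvLoopStop : List String → Option String
  | [] => none
  | w :: ws => if pvStops.contains (PySem.Str.lower w) then pvLoopStop ws else some w

def extract_main_entity_py (claim : String) : String :=
  let words := PySem.Str.split₀ claim
  match pvLoopCap words with
  | some w => w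
  | none =>
    match pvLoopStop words with
    | some w => w
    | none => PySem.Str.slice claim none (some 20)

-- ===== PORT B =====
-- single fused pass carrying the fallback candidate
def pvAltLoop : List String → Option String → String → String
  | [], cand, claim =>
    match cand with
    | some c => c
    | none => PySem.Str.slice claim none (some 20)
  | w :: ws, cand, claim =>
    if pvIsCap w then w
    else
      pvAltLoop ws
        (if cand.isNone && !(pvStops.contains (PySem.Str.lower w)) then some w else cand)
        claim

def extract_main_entity_py_alt (claim : String) : String :=
  pvAltLoop (PySem.Str.split₀ claim) none claim

-- ===== PRECONDITION & SPEC =====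
def Spec_extract_main_entity_py (claim : String) (out : String) : Prop := out = extract_main_entity_py_alt claim
instance (claim : String) (out : String) : Decidable (Spec_extract_main_entity_py claim out) := by unfold Spec_extract_main_entity_py; infer_instance

-- ===== CLAIM (what is proved, stated in full; the proofs are below) =====
def Claim_equal_extract_main_entity_py : Prop := ∀ (claim : String), Dom_extract_main_entity_py claim → Spec_extract_main_entity_py claim (extract_main_entity_py claim)

-- ===== LEMMAS AND PROOFS =====

-- invariant of B's fused loop: it computes A's two-loop answer, with `cand`
-- taking precedence over the remaining words in the fallback search
theorem pvAltLoop_eq (ws : List String) (cand : Option String) (claim : String) :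
    pvAltLoop ws cand claim =
      match pvLoopCap ws with
      | some w => w
      | none =>
        match cand with
        | some c => c
        | none =>
          match pvLoopStop ws with
          | some w => w
          | none => PySem.Str.slice claim none (some 20) := by
  induction ws generalizing cand with
  | nil => cases cand <;> simp [pvAltLoop, pvLoopCap, pvLoopStop]
  | cons w ws ih =>
    by_cases hc : pvIsCap w
    · simp [pvAltLoop, pvLoopCap, hc]
    · cases cand with
      | some c =>
        simp [pvAltLoop, pvLoopCap, hc, ih]
      | none =>
        by_cases hs : PySem.Str.lower w ∈ pvStops
        · simp [pvAltLoop, pvLoopCap, pvLoopStop, hc, hs, ih]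
        · simp [pvAltLoop, pvLoopCap, pvLoopStop, hc, hs, ih]

-- ===== VERDICT (by name: the statement is the Claim_ definition above) =====
theorem extract_main_entity_py_spec : Claim_equal_extract_main_entity_py := by
  intro claim _
  unfold Spec_extract_main_entity_py extract_main_entity_py extract_main_entity_py_alt
  rw [pvAltLoop_eq]
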